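-- pv_equiv track=rewrite | github.com/synth-me/Nebula_project | Nebula/Nebula_root.py | transverse_crossover
-- ===== SOURCE A (Python) =====
-- def transverse_crossover(genome):
--
--   storage_1 = []
--   storage_2 = []
--
--   parents_combination = {}
--
--   counter = 0
--   while counter < len(list(genome.keys())):
--
--     g_k = list(genome.keys())[counter]
--     g_c = genome[g_k]
--
--     first_half = g_c[:int(len(g_c)/2)]
--     storage_1.append(first_half)
--
--     second_half = g_c[int(len(g_c)/2):]
--     storage_2.append(second_half)
--
--     counter+=1
--
--   storage_2.reverse()
--
--   counter = 0
--   while counter < len(storage_2):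
--
--     parents_combination[counter] = []
--
--     for b_2 in storage_2[counter]:
--
--       parents_combination[counter].append(b_2)
--
--     for b_1 in storage_1[counter]:
--
--       parents_combination[counter].append(b_1)
--
--     counter+=1
--
--   return parents_combination
-- ===== SOURCE B (Python) =====
-- def transverse_crossover(genome):
--   values = list(genome.values())
--   n = len(values)
--   return {i: values[n - 1 - i][len(values[n - 1 - i]) // 2:]
--              + values[i][:len(values[i]) // 2]
--           for i in range(n)}
-- ===== Notes on version B (the rewrite author's own statement) =====
-- stated objective: faster
-- what changed: One dict comprehension over range(n) with direct indexing values[n-1-i]/values[i] replaces A's two staging lists, list.reverse, repeated list(genome.keys()) rebuilds and element-by-element append loops.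
import Mathlib
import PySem

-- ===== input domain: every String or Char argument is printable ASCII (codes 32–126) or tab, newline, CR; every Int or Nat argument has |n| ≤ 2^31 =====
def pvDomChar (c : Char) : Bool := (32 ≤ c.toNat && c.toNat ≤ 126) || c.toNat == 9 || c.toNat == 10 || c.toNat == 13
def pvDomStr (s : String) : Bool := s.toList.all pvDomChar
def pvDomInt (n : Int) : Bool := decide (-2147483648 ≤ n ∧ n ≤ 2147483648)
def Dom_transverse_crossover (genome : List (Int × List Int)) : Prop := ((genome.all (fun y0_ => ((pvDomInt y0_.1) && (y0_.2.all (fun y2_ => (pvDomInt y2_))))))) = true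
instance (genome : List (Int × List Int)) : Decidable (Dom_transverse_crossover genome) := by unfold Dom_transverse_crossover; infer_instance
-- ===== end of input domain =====

-- B replaces A's two staging lists + reverse + append loops by one direct-index pass; objective: faster (A rebuilds the key list each iteration).

-- ===== PORT A =====
-- literal port of A: iterate keys by counter collecting first/second halves,
-- reverse storage_2, then build the result dict appending element by element.
-- int(len(g_c)/2) is ported as floor division by 2, exact for these lengths.
def transverse_crossover (genome : List (Int × List Int)) : List (Int × List Int) :=
  let d := PySem.Dict.ofList genome
  let st := d.keys.foldl
    (fun (st : List (List Int) × List (List Int)) g_k =>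
      let g_c := d.getD g_k []
      let half := PySem.Int.floordiv (PySem.List.len g_c) 2
      (st.1 ++ [PySem.List.slice g_c none (some half)],
       st.2 ++ [PySem.List.slice g_c (some half) none]))
    ([], [])
  let storage_1 := st.1
  let storage_2 := st.2.reverse
  let pc := (List.range storage_2.length).foldl
    (fun (pc : PySem.Dict Int (List Int)) counter =>
      let row := (storage_2.getD counter []).foldl (fun acc b => acc ++ [b]) []
      let row := (storage_1.getD counter []).foldl (fun acc b => acc ++ [b]) row
      pc.insert (counter : Int) row)
    PySem.Dict.empty
  pc.items

-- ===== PORT B =====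
def transverse_crossover_alt (genome : List (Int × List Int)) : List (Int × List Int) :=
  let vs := (PySem.Dict.ofList genome).values
  let n := vs.length
  (List.range n).map (fun i =>
    let u := vs.getD (n - 1 - i) []
    let w := vs.getD i []
    ((i : Int), u.drop (u.length / 2) ++ w.take (w.length / 2)))

-- ===== PRECONDITION & SPEC =====
def Spec_transverse_crossover (genome : List (Int × List Int)) (out : List (Int × List Int)) : Prop := out = transverse_crossover_alt genome
instance (genome : List (Int × List Int)) (out : List (Int × List Int)) : Decidable (Spec_transverse_crossover genome out) := by unfold Spec_transverse_crossover; infer_instance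

-- ===== CLAIM (what is proved, stated in full; the proofs are below) =====
def Claim_equal_transverse_crossover : Prop := ∀ (genome : List (Int × List Int)), Dom_transverse_crossover genome → Spec_transverse_crossover genome (transverse_crossover genome)

-- ===== LEMMAS AND PROOFS =====

-- A's first while loop: the pair fold appends one mapped element to each component.
theorem pv_fold_pair {α β : Type} (f g : α → β) :
    ∀ (l : List α) (a b : List β),
      (l.foldl (fun st k => (st.1 ++ [f k], st.2 ++ [g k])) (a, b))
        = (a ++ l.map f, b ++ l.map g) := by
  intro l
  induction l with
  | nil => simp [List.foldl]
  | cons x xs ih => intro a b; simp [List.foldl, ih]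

theorem transverse_crossover_spec' (genome : List (Int × List Int)) :
    transverse_crossover genome = transverse_crossover_alt genome := by
  unfold transverse_crossover transverse_crossover_alt
  dsimp only
  set d := PySem.Dict.ofList genome with hd
  have hnd : d.keys.Nodup := PySem.Dict.nodup_keys_ofList genome
  have hvals : d.values = d.keys.map (fun k => d.getD k []) :=
    PySem.Dict.values_eq_map_keys d hnd []
  rw [pv_fold_pair]
  simp only [List.nil_append]
  -- the two staging lists, in terms of vs
  have hmap1 : d.keys.map (fun g_k =>
        PySem.List.slice (d.getD g_k [])
          none (some (PySem.Int.floordiv (PySem.List.len (d.getD g_k [])) 2)))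
      = d.values.map (fun v => v.take (v.length / 2)) := by
    rw [hvals, List.map_map]
    refine List.map_congr_left (fun k _ => ?_)
    have hh : PySem.Int.floordiv (PySem.List.len (d.getD k [])) 2
        = (((d.getD k []).length / 2 : Nat) : Int) := by
      rw [PySem.List.len_eq]; exact_mod_cast PySem.Int.floordiv_natCast _ 2
    rw [hh, PySem.List.slice_to_natCast]; rfl
  have hmap2 : d.keys.map (fun g_k =>
        PySem.List.slice (d.getD g_k [])
          (some (PySem.Int.floordiv (PySem.List.len (d.getD g_k [])) 2)) none)
      = d.values.map (fun v => v.drop (v.length / 2)) := by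
    rw [hvals, List.map_map]
    refine List.map_congr_left (fun k _ => ?_)
    have hh : PySem.Int.floordiv (PySem.List.len (d.getD k [])) 2
        = (((d.getD k []).length / 2 : Nat) : Int) := by
      rw [PySem.List.len_eq]; exact_mod_cast PySem.Int.floordiv_natCast _ 2
    rw [hh, PySem.List.slice_from_natCast]; rfl
  rw [hmap1, hmap2]
  -- the two element-append loops just concatenate
  simp only [PySem.List.foldl_append_singleton, List.nil_append]
  -- the second while loop inserts the fresh keys 0..n-1 in order
  rw [PySem.Dict.items_foldl_insert_fresh
        (d := PySem.Dict.empty)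
        (k := fun (c : Nat) => (c : Int))
        (v := fun c => ((d.values.map (fun v => v.drop (v.length / 2))).reverse.getD c [])
                ++ ((d.values.map (fun v => v.take (v.length / 2))).getD c []))
        (l := List.range (d.values.map (fun v => v.drop (v.length / 2))).reverse.length)
        (fun a _ => PySem.Dict.contains_empty _)
        ((List.nodup_range).map (fun _ _ h => by exact_mod_cast h))]
  simp only [PySem.Dict.empty, List.nil_append, List.length_reverse, List.length_map]
  refine List.map_congr_left (fun i hi => ?_)
  have hin : i < d.values.length := List.mem_range.mp hi
  have h1 : d.values.length - 1 - i < d.values.length := by omega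
  rw [List.getD_eq_getElem _ _ (by simpa using hin),
      List.getD_eq_getElem _ _ (by simpa using hin),
      List.getD_eq_getElem _ _ h1,
      List.getD_eq_getElem _ _ hin]
  simp [List.getElem_reverse, List.getElem_map]

-- ===== VERDICT (by name: the statement is the Claim_ definition above) =====
theorem transverse_crossover_spec : Claim_equal_transverse_crossover := by
  intro genome _
  unfold Spec_transverse_crossover
  exact transverse_crossover_spec' genome
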